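-- pv_equiv track=rewrite | github.com/matthewlakin/LocalizedEnumerator | src/lib.py | valid_dotparen
-- ===== SOURCE A (Python) =====
-- def exists(xs, p):
--     for x in xs:
--         if p(x):
--             return True
--     return False
--
-- def valid_dotparen(s):
--     assert isinstance(s, str)
--     if s == '':
--         return False
--     nestLevel = 0
--     if exists(s, lambda c: c not in ['.', '(', ')', '+']):
--         return False
--     numStrandBreaks = 0
--     for c in s:
--         if c == '.':
--             pass
--         elif c == '+':
--             numStrandBreaks += 1
--             if nestLevel == 0:
--                 return False
--         elif c == '(':
--             nestLevel += 1
--         elif c == ')':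
--             if nestLevel > 0:
--                 nestLevel -= 1
--             else:
--                 return False
--         else:
--             return False
--     if nestLevel != 0:
--         return False
--     return True
-- ===== SOURCE B (Python) =====
-- def valid_dotparen(s):
--     assert isinstance(s, str)
--     if s == '' or any(c not in '.()+' for c in s):
--         return False
--     t = s.replace('.', '')
--     while True:
--         u = t.replace('(+', '(').replace('()', '')
--         if u == t:
--             break
--         t = u
--     return t == ''
-- ===== Notes on version B (the rewrite author's own statement) =====
-- stated objective: alternative
-- what changed: Replaces A's counter automaton (an exists-scan for invalid characters plus a nesting-level loop) by a string-rewriting normalizer: after the character check it deletes the dots, then repeatedly rewrites each open-paren-plus pair into a lone open paren and deletes adjacent open/close paren pairs until a fixpoint, and the string is valid iff that fixpoint is empty.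
import Mathlib
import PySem

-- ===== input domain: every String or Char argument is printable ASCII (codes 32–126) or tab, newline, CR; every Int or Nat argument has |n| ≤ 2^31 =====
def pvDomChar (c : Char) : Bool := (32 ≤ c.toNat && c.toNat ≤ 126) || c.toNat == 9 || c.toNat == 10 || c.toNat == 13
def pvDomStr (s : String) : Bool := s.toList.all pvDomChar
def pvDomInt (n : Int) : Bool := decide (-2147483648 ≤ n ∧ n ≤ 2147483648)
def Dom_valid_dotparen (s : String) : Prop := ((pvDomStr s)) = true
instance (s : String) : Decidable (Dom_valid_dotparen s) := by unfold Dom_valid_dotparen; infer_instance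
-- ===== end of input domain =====

-- B replaces A's counter automaton by a string-rewriting normalizer (delete the dots, then
-- repeatedly rewrite open-paren-plus to open-paren and delete adjacent open/close paren pairs
-- to a fixpoint; valid iff empty); objective: alternative algorithm, not faster.

-- ===== PORT A =====
-- helper `exists(xs, p)` of A
def pvExists (xs : List Char) (p : Char → Bool) : Bool :=
  match xs with
  | [] => false
  | x :: rest => if p x then true else pvExists rest p

-- A's main loop: state (nestLevel, numStrandBreaks); on [] the trailing `if nestLevel != 0` check
def pvLoopA : List Char → Int → Int → Bool
  | [], nestLevel, _ => decide (nestLevel = 0)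
  | c :: rest, nestLevel, numStrandBreaks =>
    if c = '.' then pvLoopA rest nestLevel numStrandBreaks
    else if c = '+' then
      (if nestLevel = 0 then false else pvLoopA rest nestLevel (numStrandBreaks + 1))
    else if c = '(' then pvLoopA rest (nestLevel + 1) numStrandBreaks
    else if c = ')' then
      (if nestLevel > 0 then pvLoopA rest (nestLevel - 1) numStrandBreaks else false)
    else false

def valid_dotparen (s : String) : Bool :=
  if s = "" then false
  else if pvExists s.toList (fun c => !(['.', '(', ')', '+'].contains c)) then false
  else pvLoopA s.toList 0 0

-- ===== PORT B =====
-- str.replace, ported by hand for B's fixed 1- and 2-character patterns (left-to-right,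
-- non-overlapping, scanning continues after each match): exact for these patterns.
-- s.replace('.', '')
def pvDelDots : List Char → List Char
  | [] => []
  | c :: r => if c = '.' then pvDelDots r else c :: pvDelDots r

-- t.replace('(+', '(')
def pvRepl1 : List Char → List Char
  | '(' :: '+' :: r => '(' :: pvRepl1 r
  | c :: r => c :: pvRepl1 r
  | [] => []

-- t.replace('()', '')
def pvRepl2 : List Char → List Char
  | '(' :: ')' :: r => pvRepl2 r
  | c :: r => c :: pvRepl2 r
  | [] => []

-- replacing never lengthens, and a length-preserving replace changed nothing (for termination)
theorem pvRepl1_length_le (t : List Char) : (pvRepl1 t).length ≤ t.length := by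
  induction t using pvRepl1.induct <;> simp [pvRepl1] <;> omega

theorem pvRepl2_length_le (t : List Char) : (pvRepl2 t).length ≤ t.length := by
  induction t using pvRepl2.induct <;> simp [pvRepl2] <;> omega

theorem pvRepl1_eq_of_length (t : List Char) (h : (pvRepl1 t).length = t.length) :
    pvRepl1 t = t := by
  induction t using pvRepl1.induct with
  | case1 r ih =>
    have hle := pvRepl1_length_le r
    simp only [pvRepl1, List.length_cons] at h
    omega
  | case2 c r h1 ih =>
    have hr : pvRepl1 (c :: r) = c :: pvRepl1 r := by simp [pvRepl1]
    rw [hr] at h ⊢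
    simp only [List.length_cons] at h
    rw [ih (by omega)]
  | case3 => rfl

theorem pvRepl2_eq_of_length (t : List Char) (h : (pvRepl2 t).length = t.length) :
    pvRepl2 t = t := by
  induction t using pvRepl2.induct with
  | case1 r ih =>
    have hle := pvRepl2_length_le r
    simp only [pvRepl2, List.length_cons] at h
    omega
  | case2 c r h1 ih =>
    have hr : pvRepl2 (c :: r) = c :: pvRepl2 r := by simp [pvRepl2]
    rw [hr] at h ⊢
    simp only [List.length_cons] at h
    rw [ih (by omega)]
  | case3 => rfl

theorem pvStep_lt (t : List Char) (h : pvRepl2 (pvRepl1 t) ≠ t) :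
    (pvRepl2 (pvRepl1 t)).length < t.length := by
  have h1 := pvRepl1_length_le t
  have h2 := pvRepl2_length_le (pvRepl1 t)
  by_contra hc
  have e1 : pvRepl1 t = t := pvRepl1_eq_of_length t (by omega)
  have e2 : pvRepl2 (pvRepl1 t) = pvRepl1 t := pvRepl2_eq_of_length (pvRepl1 t) (by omega)
  exact h (by rw [e2, e1])

-- B's while-loop: rewrite until the string stops changing
def pvBIter (t : List Char) : List Char :=
  let u := pvRepl2 (pvRepl1 t)
  if h : u = t then t else pvBIter u
termination_by t.length
decreasing_by exact pvStep_lt t h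

-- `c not in '.()+'` is ported as membership in that string's character list (exact)
def valid_dotparen_alt (s : String) : Bool :=
  if s = "" then false
  else if s.toList.any (fun c => !(['.', '(', ')', '+'].contains c)) then false
  else pvBIter (pvDelDots s.toList) == []

-- ===== PRECONDITION & SPEC =====
def Spec_valid_dotparen (s : String) (out : Bool) : Prop := out = valid_dotparen_alt s
instance (s : String) (out : Bool) : Decidable (Spec_valid_dotparen s out) := by unfold Spec_valid_dotparen; infer_instance

-- ===== CLAIM (what is proved, stated in full; the proofs are below) =====
def Claim_equal_valid_dotparen : Prop := ∀ (s : String), Dom_valid_dotparen s → Spec_valid_dotparen s (valid_dotparen s)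

-- ===== LEMMAS AND PROOFS =====

-- clean counter automaton (proof-side reference; A's loop without its unused counter)
def pvNest : List Char → Int → Bool
  | [], n => decide (n = 0)
  | c :: r, n =>
    if c = '.' then pvNest r n
    else if c = '+' then (if n = 0 then false else pvNest r n)
    else if c = '(' then pvNest r (n + 1)
    else if c = ')' then (if n = 0 then false else pvNest r (n - 1))
    else false

theorem pvLoopA_eq_pvNest (l : List Char) (n k : Int) (hn : 0 ≤ n) :
    pvLoopA l n k = pvNest l n := by
  induction l generalizing n k with
  | nil => simp [pvLoopA, pvNest]
  | cons c rest ih =>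
    simp only [pvLoopA, pvNest]
    split_ifs <;>
      first
      | rfl
      | exact ih _ _ hn
      | exact ih _ _ (by omega)
      | omega

theorem pvNest_delDots (l : List Char) (n : Int) :
    pvNest (pvDelDots l) n = pvNest l n := by
  induction l generalizing n with
  | nil => rfl
  | cons c r ih =>
    by_cases hc : c = '.'
    · simp [pvDelDots, hc, pvNest, ih]
    · simp only [pvDelDots, if_neg hc, pvNest]
      split_ifs <;> simp [ih]

theorem pvNest_repl1 (l : List Char) (n : Int) (hn : 0 ≤ n) :
    pvNest (pvRepl1 l) n = pvNest l n := by
  induction l using pvRepl1.induct generalizing n with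
  | case1 r ih =>
    have hred : pvRepl1 ('(' :: '+' :: r) = '(' :: pvRepl1 r := by simp [pvRepl1]
    rw [hred]
    have hL : pvNest ('(' :: pvRepl1 r) n = pvNest (pvRepl1 r) (n + 1) := by simp [pvNest]
    have hR : pvNest ('(' :: '+' :: r) n = pvNest r (n + 1) := by
      have hn1 : (n + 1 : Int) ≠ 0 := by omega
      simp [pvNest, hn1]
    rw [hL, hR]
    exact ih (n + 1) (by omega)
  | case2 c r h1 ih =>
    have hred : pvRepl1 (c :: r) = c :: pvRepl1 r := by simp [pvRepl1]
    rw [hred]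
    simp only [pvNest]
    split_ifs <;>
      first
      | rfl
      | exact ih _ hn
      | exact ih _ (by omega)
  | case3 => rfl

theorem pvNest_repl2 (l : List Char) (n : Int) (hn : 0 ≤ n) :
    pvNest (pvRepl2 l) n = pvNest l n := by
  induction l using pvRepl2.induct generalizing n with
  | case1 r ih =>
    have hred : pvRepl2 ('(' :: ')' :: r) = pvRepl2 r := by simp [pvRepl2]
    rw [hred]
    have hR : pvNest ('(' :: ')' :: r) n = pvNest r n := by
      have hn1 : (n + 1 : Int) ≠ 0 := by omega
      have hsub : (n + 1 : Int) - 1 = n := by omega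
      simp [pvNest, hn1, hsub]
    rw [hR]
    exact ih n hn
  | case2 c r h1 ih =>
    have hred : pvRepl2 (c :: r) = c :: pvRepl2 r := by simp [pvRepl2]
    rw [hred]
    simp only [pvNest]
    split_ifs <;>
      first
      | rfl
      | exact ih _ hn
      | exact ih _ (by omega)
  | case3 => rfl

-- the normalizer preserves the automaton's verdict
theorem pvNest_bIter (t : List Char) : pvNest (pvBIter t) 0 = pvNest t 0 := by
  induction t using pvBIter.induct with
  | case1 t u h => rw [pvBIter, dif_pos h]
  | case2 t u h ih =>
    rw [pvBIter, dif_neg h]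
    rw [ih, pvNest_repl2 _ 0 le_rfl, pvNest_repl1 _ 0 le_rfl]

-- the normalizer's result is a fixpoint of the rewrite step
theorem pvBIter_fix (t : List Char) : pvRepl2 (pvRepl1 (pvBIter t)) = pvBIter t := by
  induction t using pvBIter.induct with
  | case1 t u h => rw [pvBIter, dif_pos h]; exact h
  | case2 t u h ih => rw [pvBIter, dif_neg h]; exact ih

-- rewriting only deletes characters
theorem mem_pvRepl1 (t : List Char) (c : Char) (h : c ∈ pvRepl1 t) : c ∈ t := by
  induction t using pvRepl1.induct with
  | case1 r ih =>
    rw [show pvRepl1 ('(' :: '+' :: r) = '(' :: pvRepl1 r from by simp [pvRepl1]] at h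
    rcases List.mem_cons.mp h with h | h
    · exact h ▸ List.mem_cons_self
    · exact List.mem_cons_of_mem _ (List.mem_cons_of_mem _ (ih h))
  | case2 d r h1 ih =>
    rw [show pvRepl1 (d :: r) = d :: pvRepl1 r from by simp [pvRepl1]] at h
    rcases List.mem_cons.mp h with h | h
    · exact h ▸ List.mem_cons_self
    · exact List.mem_cons_of_mem _ (ih h)
  | case3 => exact h

theorem mem_pvRepl2 (t : List Char) (c : Char) (h : c ∈ pvRepl2 t) : c ∈ t := by
  induction t using pvRepl2.induct with
  | case1 r ih =>
    rw [show pvRepl2 ('(' :: ')' :: r) = pvRepl2 r from by simp [pvRepl2]] at h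
    exact List.mem_cons_of_mem _ (List.mem_cons_of_mem _ (ih h))
  | case2 d r h1 ih =>
    rw [show pvRepl2 (d :: r) = d :: pvRepl2 r from by simp [pvRepl2]] at h
    rcases List.mem_cons.mp h with h | h
    · exact h ▸ List.mem_cons_self
    · exact List.mem_cons_of_mem _ (ih h)
  | case3 => exact h

theorem mem_pvBIter (t : List Char) (c : Char) (h : c ∈ pvBIter t) : c ∈ t := by
  induction t using pvBIter.induct with
  | case1 t u h' => rwa [pvBIter, dif_pos h'] at h
  | case2 t u h' ih =>
    rw [pvBIter, dif_neg h'] at h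
    exact mem_pvRepl1 t c (mem_pvRepl2 _ c (ih h))

theorem mem_pvDelDots (l : List Char) (c : Char) (h : c ∈ pvDelDots l) : c ∈ l ∧ c ≠ '.' := by
  induction l with
  | nil => exact absurd h List.not_mem_nil
  | cons d r ih =>
    by_cases hd : d = '.'
    · rw [pvDelDots, if_pos hd] at h
      exact ⟨List.mem_cons_of_mem d (ih h).1, (ih h).2⟩
    · rw [pvDelDots, if_neg hd] at h
      rcases List.mem_cons.mp h with h | h
      · subst h; exact ⟨List.mem_cons_self, hd⟩
      · exact ⟨List.mem_cons_of_mem d (ih h).1, (ih h).2⟩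

-- a pattern-free fixpoint over {(,),+} that starts with '(' is rejected from any nonnegative level
theorem pvFix_open_false (t : List Char) (n : Int) (hn : 0 ≤ n)
    (hf1 : pvRepl1 t = t) (hf2 : pvRepl2 t = t)
    (halph : ∀ c ∈ t, c = '(' ∨ c = ')' ∨ c = '+')
    (hhd : ∃ r, t = '(' :: r) : pvNest t n = false := by
  induction t generalizing n with
  | nil => obtain ⟨r, hr⟩ := hhd; exact absurd hr (by simp)
  | cons c r ih =>
    obtain ⟨r', hr⟩ := hhd
    rw [List.cons.injEq] at hr
    obtain ⟨hc, hrr⟩ := hr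
    subst hc
    have hstep : pvNest ('(' :: r) n = pvNest r (n + 1) := by simp [pvNest]
    rw [hstep]
    rcases r with _ | ⟨d, r''⟩
    · simp [pvNest]; omega
    · have hd : d = '(' := by
        rcases halph d (by simp) with h | h | h
        · exact h
        · exfalso
          rw [h] at hf2
          have hlen : (pvRepl2 ('(' :: ')' :: r'')).length = ('(' :: ')' :: r'').length := by
            rw [hf2]
          have hle := pvRepl2_length_le r''
          rw [show pvRepl2 ('(' :: ')' :: r'') = pvRepl2 r'' from by simp [pvRepl2]] at hlen
          simp only [List.length_cons] at hlen
          omega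
        · exfalso
          rw [h] at hf1
          have hlen : (pvRepl1 ('(' :: '+' :: r'')).length = ('(' :: '+' :: r'').length := by
            rw [hf1]
          have hle := pvRepl1_length_le r''
          rw [show pvRepl1 ('(' :: '+' :: r'') = '(' :: pvRepl1 r'' from by simp [pvRepl1]] at hlen
          simp only [List.length_cons] at hlen
          omega
      subst hd
      have hf1' : pvRepl1 ('(' :: r'') = '(' :: r'' := by
        have hx : pvRepl1 ('(' :: '(' :: r'') = '(' :: pvRepl1 ('(' :: r'') := by simp [pvRepl1]
        rw [hx, List.cons.injEq] at hf1
        exact hf1.2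
      have hf2' : pvRepl2 ('(' :: r'') = '(' :: r'' := by
        have hx : pvRepl2 ('(' :: '(' :: r'') = '(' :: pvRepl2 ('(' :: r'') := by simp [pvRepl2]
        rw [hx, List.cons.injEq] at hf2
        exact hf2.2
      exact ih (n + 1) (by omega) hf1' hf2'
        (fun c hc => halph c (List.mem_cons_of_mem _ hc)) ⟨r'', rfl⟩

-- a nonempty full fixpoint of the rewrite step over {(,),+} is invalid
theorem pvFix_invalid (t : List Char) (hf : pvRepl2 (pvRepl1 t) = t) (hne : t ≠ [])
    (halph : ∀ c ∈ t, c = '(' ∨ c = ')' ∨ c = '+') : pvNest t 0 = false := by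
  have h1 := pvRepl1_length_le t
  have h2 := pvRepl2_length_le (pvRepl1 t)
  have hlen : (pvRepl2 (pvRepl1 t)).length = t.length := by rw [hf]
  have hf1 : pvRepl1 t = t := pvRepl1_eq_of_length t (by omega)
  have hf2 : pvRepl2 t = t := by
    have := pvRepl2_eq_of_length (pvRepl1 t) (by omega)
    rwa [hf1] at this
  rcases t with _ | ⟨c, r⟩
  · exact absurd rfl hne
  · rcases halph c List.mem_cons_self with h | h | h
    · subst h
      exact pvFix_open_false _ 0 le_rfl hf1 hf2 halph ⟨r, rfl⟩
    · subst h; simp [pvNest]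
    · subst h; simp [pvNest]

-- B's normalizer decides exactly the automaton's verdict, over the alphabet {(,),+}
theorem pvBIter_iff_pvNest (t : List Char)
    (halph : ∀ c ∈ t, c = '(' ∨ c = ')' ∨ c = '+') :
    (pvBIter t == []) = pvNest t 0 := by
  by_cases h : pvBIter t = []
  · rw [← pvNest_bIter, h]
    simp [pvNest]
  · have hfalse : pvNest t 0 = false := by
      rw [← pvNest_bIter]
      exact pvFix_invalid _ (pvBIter_fix t) h
        (fun c hc => halph c (mem_pvBIter t c hc))
    rw [hfalse]
    simp [h]

-- A's exists-scan is List.any with the same predicate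
theorem pvExists_eq_any (xs : List Char) (p : Char → Bool) : pvExists xs p = xs.any p := by
  induction xs with
  | nil => rfl
  | cons x r ih => by_cases h : p x = true <;> simp [pvExists, h, ih]

-- ===== VERDICT (by name: the statement is the Claim_ definition above) =====
theorem valid_dotparen_spec : Claim_equal_valid_dotparen := by
  intro s _
  unfold Spec_valid_dotparen valid_dotparen valid_dotparen_alt
  by_cases hs : s = ""
  · rw [if_pos hs, if_pos hs]
  · rw [if_neg hs, if_neg hs, pvExists_eq_any]
    by_cases he : s.toList.any (fun c => !(['.', '(', ')', '+'].contains c)) = true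
    · rw [if_pos he, if_pos he]
    · rw [if_neg he, if_neg he]
      have halph : ∀ c ∈ pvDelDots s.toList, c = '(' ∨ c = ')' ∨ c = '+' := by
        intro c hc
        obtain ⟨hmem, hdot⟩ := mem_pvDelDots s.toList c hc
        have he' : ∀ x ∈ s.toList, x = '.' ∨ x = '(' ∨ x = ')' ∨ x = '+' := by
          intro x hx
          by_contra hxc
          push_neg at hxc
          have : s.toList.any (fun c => !(['.', '(', ')', '+'].contains c)) = true := by
            rw [List.any_eq_true]
            exact ⟨x, hx, by simp [List.contains_eq_mem, hxc.1, hxc.2.1, hxc.2.2.1, hxc.2.2.2]⟩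
          exact he this
        rcases he' c hmem with h | h | h | h
        · exact absurd h hdot
        · exact Or.inl h
        · exact Or.inr (Or.inl h)
        · exact Or.inr (Or.inr h)
      rw [pvLoopA_eq_pvNest _ 0 0 le_rfl, ← pvNest_delDots,
        ← pvBIter_iff_pvNest _ halph]
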